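-- pv_equiv track=rewrite | github.com/agustinacf/RepasoSegundoParcialIP | parcial.py | acomodar
-- ===== SOURCE A (Python) =====
-- def acomodar(s: list[str]) -> list[str]:
--     lista_acomodada: list[str] = []
--     lista_up: list[str] = []
--     lista_lla: list[str] = []
--
--     for partido in s:
--         if partido == "UP":
--             lista_up.append(partido) # agrego en lista_up las apariciones de UP
--         elif partido == "LLA":
--             lista_lla.append(partido) # agrego en lista_lla las apariciones de LLA
--
--     for partido in lista_up:
--         lista_acomodada.append(partido) # agrego primero los elementos de lista_up
--
--     for partido in lista_lla:
--         lista_acomodada.append(partido) # luego agrego los elementos de lista_lla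
--
--     return lista_acomodada
-- ===== SOURCE B (Python) =====
-- def acomodar(s: list[str]) -> list[str]:
--     return ["UP"] * s.count("UP") + ["LLA"] * s.count("LLA")
-- ===== Notes on version B (the rewrite author's own statement) =====
-- stated objective: simpler
-- what changed: B keeps no lists: it counts the 'UP' and 'LLA' occurrences and builds the result by list replication instead of filtering into two lists and appending them element by element.
import Mathlib
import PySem

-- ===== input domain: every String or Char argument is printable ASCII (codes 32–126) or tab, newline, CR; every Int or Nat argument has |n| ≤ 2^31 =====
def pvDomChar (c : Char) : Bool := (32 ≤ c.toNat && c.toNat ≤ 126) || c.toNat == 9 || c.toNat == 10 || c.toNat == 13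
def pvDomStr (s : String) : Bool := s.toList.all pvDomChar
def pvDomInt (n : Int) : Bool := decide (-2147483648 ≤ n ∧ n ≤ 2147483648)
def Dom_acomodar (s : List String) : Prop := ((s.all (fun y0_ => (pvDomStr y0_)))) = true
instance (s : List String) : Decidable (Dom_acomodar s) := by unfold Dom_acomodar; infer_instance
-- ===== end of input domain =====

-- B counts the 'UP'/'LLA' occurrences and builds the result by replication instead of
-- filtering into two lists and appending them one by one (objective: simpler).

-- ===== PORT A =====
-- first loop: classify each element into lista_up / lista_lla
def acomodar (s : List String) : List String :=
  let pair := s.foldl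
    (fun (st : List String × List String) partido =>
      if partido == "UP" then (st.1 ++ [partido], st.2)
      else if partido == "LLA" then (st.1, st.2 ++ [partido])
      else st)
    ([], [])
  -- second loop: append lista_up onto lista_acomodada
  let acc1 := pair.1.foldl (fun acc partido => acc ++ [partido]) []
  -- third loop: append lista_lla
  pair.2.foldl (fun acc partido => acc ++ [partido]) acc1

-- ===== PORT B =====
def acomodar_alt (s : List String) : List String :=
  List.replicate (PySem.List.count s "UP") "UP" ++ List.replicate (PySem.List.count s "LLA") "LLA"

-- ===== PRECONDITION & SPEC =====
def Spec_acomodar (s : List String) (out : List String) : Prop := out = acomodar_alt s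
instance (s : List String) (out : List String) : Decidable (Spec_acomodar s out) := by unfold Spec_acomodar; infer_instance

-- ===== CLAIM (what is proved, stated in full; the proofs are below) =====
def Claim_equal_acomodar : Prop := ∀ (s : List String), Dom_acomodar s → Spec_acomodar s (acomodar s)

-- ===== LEMMAS AND PROOFS =====

-- the classifying loop appends the filtered occurrences to each accumulator
theorem acomodar_pair (s : List String) (u l : List String) :
    s.foldl
      (fun (st : List String × List String) partido =>
        if partido == "UP" then (st.1 ++ [partido], st.2)
        else if partido == "LLA" then (st.1, st.2 ++ [partido])
        else st)
      (u, l)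
    = (u ++ s.filter (· == "UP"), l ++ s.filter (· == "LLA")) := by
  induction s generalizing u l with
  | nil => simp
  | cons x xs ih =>
    by_cases hu : x = "UP"
    · subst hu
      rw [List.foldl_cons]
      refine (ih (u ++ ["UP"]) l).trans ?_
      simp
    · by_cases hl : x = "LLA"
      · subst hl
        rw [List.foldl_cons]
        refine (ih u (l ++ ["LLA"])).trans ?_
        simp
      · rw [List.foldl_cons, if_neg (by simp [hu]), if_neg (by simp [hl]), ih]
        simp [hu, hl]

-- the append loops just concatenate
theorem foldl_append_singleton (s acc : List String) :
    s.foldl (fun acc partido => acc ++ [partido]) acc = acc ++ s := by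
  induction s generalizing acc with
  | nil => simp
  | cons x xs ih => simp [List.foldl_cons, ih]

theorem filter_eq_replicate_count (s : List String) (v : String) :
    s.filter (· == v) = List.replicate (s.count v) v := by
  induction s with
  | nil => simp
  | cons x xs ih =>
    by_cases h : x = v
    · subst h; simp [ih, List.replicate_succ]
    · simp [h, ih]

-- ===== VERDICT (by name: the statement is the Claim_ definition above) =====
theorem acomodar_spec : Claim_equal_acomodar := by
  intro s _
  unfold Spec_acomodar acomodar acomodar_alt
  simp only [acomodar_pair, foldl_append_singleton, List.nil_append,
    filter_eq_replicate_count, PySem.List.count_eq]
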